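-- pv_equiv track=rewrite | github.com/martijnvermaat/monoseq | monoseq/monoseq.py | partition_range
-- ===== SOURCE A (Python) =====
-- import itertools
--
-- def partition_range(stop, annotations=None):
--     """
--     Partition the range from 0 to `stop` based on annotations.
--
--         >>> partition_range(50, annotations=[[(0, 21), (30, 35)],
--         ...                                  [(15, 32), (40, 46)]])
--         [(0, 15, {0}),
--          (15, 21, {0, 1}),
--          (21, 30, {1}),
--          (30, 32, {0, 1}),
--          (32, 35, {0}),
--          (35, 40, set()),
--          (40, 46, {1}),
--          (46, 50, set())]
--
--     :arg stop: End point (not included) of the range (similar to the `stop`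
--         argument of the built-in `range` function).
--     :type stop: int
--     :arg annotations: For each annotation level, a list of (`start`, `stop`)
--         pairs defining an annotated region.
--     :type annotations: list
--
--     :return: Partitioning of the range as (`start`, `stop`, `levels`) tuples
--         defining a region with a set of annotation levels.
--     :rtype: list
--
--     All regions (`start`, `stop`) are defined as in slicing notation, so
--     zero-based and `stop` is not included.
--
--     The `annotations` argument is a list of annotations. An annotation is a
--     list of regions as (`start`, `stop`) tuples. The level of each annotation
--     is its index in `annotations`.
--
--     Annotation regions can overlap (overlap within one level is ignored) and
--     do not need to be sorted.
--     """
--     annotations = annotations or []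
--
--     partitioning = []
--     part_start, part_levels = 0, None
--
--     # We loop over the range, only touching positions where levels potentially
--     # change.
--     for p in sorted(set(itertools.chain([0, stop],
--                                         *itertools.chain(*annotations)))):
--         if p == stop:
--             partitioning.append( (part_start, p, part_levels) )
--             break
--
--         # Annotation levels for position p.
--         levels = {level for level, regions in enumerate(annotations)
--                   if any(x <= p < y for x, y in regions)}
--
--         if p == 0:
--             part_levels = levels
--             continue
--
--         if levels != part_levels:
--             partitioning.append( (part_start, p, part_levels) )
--             part_start, part_levels = p, levels
--
--     return partitioning
-- ===== SOURCE B (Python) =====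
-- def partition_range(stop, annotations=None):
--     """Sweep line: per-position level deltas built once, active-region counters
--     maintained incrementally; no per-position scan over all regions."""
--     annotations = annotations or []
--     n = len(annotations)
--     deltas = {}
--     positions = {0, stop}
--     for level, regions in enumerate(annotations):
--         for x, y in regions:
--             positions.add(x)
--             positions.add(y)
--             if x < y:
--                 deltas[(x, level)] = deltas.get((x, level), 0) + 1
--                 deltas[(y, level)] = deltas.get((y, level), 0) - 1
--
--     counts = [0] * n
--     partitioning = []
--     part_start, part_levels = 0, None
--     for p in sorted(positions):
--         if p == stop:
--             partitioning.append((part_start, p, part_levels))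
--             break
--         counts = [c + deltas.get((p, l), 0) for l, c in enumerate(counts)]
--         levels = {l for l in range(n) if counts[l] > 0}
--         if p == 0:
--             part_levels = levels
--             continue
--         if levels != part_levels:
--             partitioning.append((part_start, p, part_levels))
--             part_start, part_levels = p, levels
--     return partitioning
-- ===== Notes on version B (the rewrite author's own statement) =====
-- stated objective: faster
-- what changed: A recomputes the active level set at every boundary by scanning every region of every level; B builds a dict of per-(position, level) counter deltas once and sweeps the sorted boundaries updating per-level counters incrementally, so the inner scan over all regions disappears.
-- outside the precondition, e.g. on partition_range(0, None): A returns [(0, 0, None)], B returns [(0, 0, None)]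
import Mathlib
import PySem

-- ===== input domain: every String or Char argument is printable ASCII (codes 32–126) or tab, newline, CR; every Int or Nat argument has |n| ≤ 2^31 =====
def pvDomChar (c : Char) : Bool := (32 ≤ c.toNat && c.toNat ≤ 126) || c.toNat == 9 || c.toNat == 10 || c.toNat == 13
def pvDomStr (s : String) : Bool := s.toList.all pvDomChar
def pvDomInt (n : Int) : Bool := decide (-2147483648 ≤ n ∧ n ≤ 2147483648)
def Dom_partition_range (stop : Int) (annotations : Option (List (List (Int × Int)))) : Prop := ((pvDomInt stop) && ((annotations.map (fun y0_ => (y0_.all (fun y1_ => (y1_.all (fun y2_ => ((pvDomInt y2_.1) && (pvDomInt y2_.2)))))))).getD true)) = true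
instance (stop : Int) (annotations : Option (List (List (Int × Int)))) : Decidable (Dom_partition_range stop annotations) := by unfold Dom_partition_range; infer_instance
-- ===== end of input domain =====

-- B replaces A's per-position scan over every region (levels recomputed from scratch at each
-- boundary) by a sweep line: per-position level deltas grouped once in a dict and per-level
-- counters updated incrementally while walking the sorted boundaries.

-- ===== PORT A =====
-- {level for level, regions in enumerate(annotations) if any(x <= p < y for x, y in regions)}
def pvLevelsAt (anns : List (List (Int × Int))) (p : Int) : List Int :=
  PySem.Set.ofList ((PySem.List.enumerate anns 0).filterMap
    (fun lr => if lr.2.any (fun r => decide (r.1 ≤ p) && decide (p < r.2)) then some lr.1 else none))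

-- the main loop of A (part_levels is None before position 0 has been seen; the appends with
-- '.getD []' are only reachable with part_levels = none OUTSIDE Pre_, where Python appends None)
def pvLoopA (stop : Int) (anns : List (List (Int × Int))) :
    List Int → Int → Option (List Int) → List (Int × Int × List Int) → List (Int × Int × List Int)
  | [], _, _, acc => acc
  | p :: rest, part_start, part_levels, acc =>
    if p = stop then acc ++ [(part_start, p, part_levels.getD [])]
    else
      let levels := pvLevelsAt anns p
      if p = 0 then pvLoopA stop anns rest part_start (some levels) acc
      else if some levels ≠ part_levels then
        pvLoopA stop anns rest p (some levels) (acc ++ [(part_start, p, part_levels.getD [])])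
      else pvLoopA stop anns rest part_start part_levels acc

-- itertools.chain([0, stop], *itertools.chain(*annotations)) flattened to single coordinates
def pvAllCoords (anns : List (List (Int × Int))) : List Int :=
  anns.flatten.flatMap (fun r => [r.1, r.2])

def partition_range (stop : Int) (annotations : Option (List (List (Int × Int)))) : List (Int × Int × List Int) :=
  let anns := annotations.getD []
  let positions := PySem.List.sorted (PySem.Set.ofList (0 :: stop :: pvAllCoords anns)) (fun x => x) false
  pvLoopA stop anns positions 0 none []

-- ===== PORT B =====
-- the single building pass of Source B: the position set {0, stop} ∪ coords and the dict of
-- per-(position, level) counter deltas (only regions with x < y contribute)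
def pvBuildB (stop : Int) (anns : List (List (Int × Int))) :
    List Int × PySem.Dict (Int × Int) Int :=
  (PySem.List.enumerate anns 0).foldl (fun st lr =>
    lr.2.foldl (fun st r =>
      let pos := PySem.Set.add (PySem.Set.add st.1 r.1) r.2
      if r.1 < r.2 then
        let d := st.2.insert (r.1, lr.1) (st.2.getD (r.1, lr.1) 0 + 1)
        (pos, d.insert (r.2, lr.1) (d.getD (r.2, lr.1) 0 - 1))
      else (pos, st.2)) st)
    (PySem.Set.add (PySem.Set.add PySem.Set.empty 0) stop, PySem.Dict.empty)

-- the sweep loop of Source B: counts are updated from the deltas at p, then the active level set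
-- (like A, part_levels is None before position 0 has been seen; '.getD []' is only reachable
-- with part_levels = none OUTSIDE Pre_, where Python appends None)
def pvLoopB (stop : Int) (n : Nat) (deltas : PySem.Dict (Int × Int) Int) :
    List Int → List Int → Int → Option (List Int) → List (Int × Int × List Int) → List (Int × Int × List Int)
  | [], _, _, _, acc => acc
  | p :: rest, counts, part_start, part_levels, acc =>
    if p = stop then acc ++ [(part_start, p, part_levels.getD [])]
    else
      let counts := (PySem.List.enumerate counts 0).map (fun lc => lc.2 + deltas.getD (p, lc.1) 0)
      let levels := PySem.Set.ofList ((PySem.List.pyRange 0 (n : Int) 1).filter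
        (fun l => decide (0 < PySem.List.pyGetD counts l 0)))
      if p = 0 then pvLoopB stop n deltas rest counts part_start (some levels) acc
      else if some levels ≠ part_levels then
        pvLoopB stop n deltas rest counts p (some levels) (acc ++ [(part_start, p, part_levels.getD [])])
      else pvLoopB stop n deltas rest counts part_start part_levels acc

def partition_range_alt (stop : Int) (annotations : Option (List (List (Int × Int)))) : List (Int × Int × List Int) :=
  let anns := annotations.getD []
  let n := anns.length
  let pd := pvBuildB stop anns
  let positions := PySem.List.sorted pd.1 (fun x => x) false
  pvLoopB stop n pd.2 positions (List.replicate n 0) 0 none []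

-- ===== PRECONDITION & SPEC =====
-- Pre_ excludes inputs with stop ≤ 0 or a negative region coordinate: on exactly those A's
-- output contains a tuple whose third component is None, not a set — not a value of the
-- declared return type List (Int × Int × List Int).
def Pre_partition_range (stop : Int) (annotations : Option (List (List (Int × Int)))) : Prop :=
  1 ≤ stop ∧ ∀ lv ∈ annotations.getD [], ∀ r ∈ lv, 0 ≤ r.1 ∧ 0 ≤ r.2
instance (stop : Int) (annotations : Option (List (List (Int × Int)))) : Decidable (Pre_partition_range stop annotations) := by unfold Pre_partition_range; infer_instance

def pvWitness_partition_range : Int × (Option (List (List (Int × Int)))) :=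
  (50, some [[(0, 21), (30, 35)], [(15, 32), (40, 46)]])

def Spec_partition_range (stop : Int) (annotations : Option (List (List (Int × Int)))) (out : List (Int × Int × List Int)) : Prop := out = partition_range_alt stop annotations
instance (stop : Int) (annotations : Option (List (List (Int × Int)))) (out : List (Int × Int × List Int)) : Decidable (Spec_partition_range stop annotations out) := by unfold Spec_partition_range; infer_instance

-- ===== CLAIM (what is proved, stated in full; the proofs are below) =====
def Claim_equal_partition_range : Prop := ∀ (stop : Int) (annotations : Option (List (List (Int × Int)))), Dom_partition_range stop annotations → Pre_partition_range stop annotations → Spec_partition_range stop annotations (partition_range stop annotations)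

-- ===== LEMMAS AND PROOFS =====

def pvS (anns : List (List (Int × Int))) (proc : List Int) (l : Int) : Int :=
  ((PySem.List.pyGetD anns l []).map (fun r =>
    if r.1 < r.2 then (if r.1 ∈ proc then (1:Int) else 0) - (if r.2 ∈ proc then 1 else 0) else 0)).sum

def pvContrib (k : Int) (r : Int × Int) : Int :=
  if r.1 < r.2 then (if r.1 = k then (1:Int) else 0) - (if r.2 = k then 1 else 0) else 0

def pvDStep (level : Int) (d : PySem.Dict (Int × Int) Int) (r : Int × Int) : PySem.Dict (Int × Int) Int :=
  if r.1 < r.2 then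
    let d' := d.insert (r.1, level) (d.getD (r.1, level) 0 + 1)
    d'.insert (r.2, level) (d'.getD (r.2, level) 0 - 1)
  else d

def pvPStep (s : List Int) (r : Int × Int) : List Int :=
  PySem.Set.add (PySem.Set.add s r.1) r.2


lemma pvInner_eq (rs : List (Int × Int)) (lv : Int) (ab : List Int × PySem.Dict (Int × Int) Int) :
    rs.foldl (fun st r =>
      let pos := PySem.Set.add (PySem.Set.add st.1 r.1) r.2
      if r.1 < r.2 then
        let d := st.2.insert (r.1, lv) (st.2.getD (r.1, lv) 0 + 1)
        (pos, d.insert (r.2, lv) (d.getD (r.2, lv) 0 - 1))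
      else (pos, st.2)) ab
    = (rs.foldl pvPStep ab.1, rs.foldl (pvDStep lv) ab.2) := by
  induction rs generalizing ab with
  | nil => rfl
  | cons r rs ih =>
    simp only [List.foldl_cons]
    have h : (let pos := PySem.Set.add (PySem.Set.add ab.1 r.1) r.2
        if r.1 < r.2 then
          let d := ab.2.insert (r.1, lv) (ab.2.getD (r.1, lv) 0 + 1)
          (pos, d.insert (r.2, lv) (d.getD (r.2, lv) 0 - 1))
        else (pos, ab.2)) = (pvPStep ab.1 r, pvDStep lv ab.2 r) := by
      simp only [pvPStep, pvDStep]
      split <;> rfl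
    rw [h, ih]

lemma pvBuildB_eq (stop : Int) (anns : List (List (Int × Int))) :
    pvBuildB stop anns =
      ((PySem.List.enumerate anns 0).foldl (fun s lr => lr.2.foldl pvPStep s)
         (PySem.Set.add (PySem.Set.add PySem.Set.empty 0) stop),
       (PySem.List.enumerate anns 0).foldl (fun d lr => lr.2.foldl (pvDStep lr.1) d)
         PySem.Dict.empty) := by
  unfold pvBuildB
  generalize PySem.List.enumerate anns 0 = L
  generalize (PySem.Set.add (PySem.Set.add PySem.Set.empty 0) stop : List Int) = a
  generalize (PySem.Dict.empty : PySem.Dict (Int × Int) Int) = b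
  show List.foldl _ (a, b) L = _
  induction L generalizing a b with
  | nil => rfl
  | cons lr L ih =>
    simp only [List.foldl_cons]
    rw [pvInner_eq, ih]

lemma pvBuildB_fst (stop : Int) (anns : List (List (Int × Int))) :
    (pvBuildB stop anns).1 = PySem.Set.ofList (0 :: stop :: pvAllCoords anns) := by
  rw [pvBuildB_eq]
  show (PySem.List.enumerate anns 0).foldl (fun s lr => lr.2.foldl pvPStep s)
      (PySem.Set.add (PySem.Set.add PySem.Set.empty 0) stop) = _
  rw [PySem.Set.ofList_eq_foldl]
  show _ = List.foldl PySem.Set.add (PySem.Set.add (PySem.Set.add [] 0) stop) (pvAllCoords anns)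
  unfold pvAllCoords
  rw [List.foldl_flatMap, List.foldl_flatten]
  have h : (PySem.List.enumerate anns 0).foldl (fun s lr => lr.2.foldl pvPStep s)
      (PySem.Set.add (PySem.Set.add PySem.Set.empty 0) stop)
      = ((PySem.List.enumerate anns 0).map (·.2)).foldl (fun s rs => rs.foldl pvPStep s)
        (PySem.Set.add (PySem.Set.add PySem.Set.empty 0) stop) := by
    rw [List.foldl_map]
  rw [h, PySem.List.map_snd_enumerate]
  rfl

lemma pvDStep_getD (k l lv : Int) (r : Int × Int) (d : PySem.Dict (Int × Int) Int) :
    (pvDStep lv d r).getD (k, l) 0 = d.getD (k, l) 0 + (if lv = l then pvContrib k r else 0) := by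
  unfold pvDStep pvContrib
  by_cases hxy : r.1 < r.2
  · have hne : r.1 ≠ r.2 := ne_of_lt hxy
    simp only [hxy, if_true, PySem.Dict.getD_insert]
    split_ifs <;> simp_all [Prod.ext_iff] <;> omega
  · simp [hxy]

lemma pvDFold_getD (k l lv : Int) (rs : List (Int × Int)) (d : PySem.Dict (Int × Int) Int) :
    (rs.foldl (pvDStep lv) d).getD (k, l) 0
      = d.getD (k, l) 0 + (if lv = l then (rs.map (pvContrib k)).sum else 0) := by
  induction rs generalizing d with
  | nil => simp
  | cons r rs ih =>
    simp only [List.foldl_cons, List.map_cons, List.sum_cons, ih, pvDStep_getD]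
    by_cases h : lv = l <;> simp [h] <;> ring

lemma pvDeltasFold_getD (k l : Int) (L : List (Int × List (Int × Int))) (d : PySem.Dict (Int × Int) Int) :
    (L.foldl (fun d lr => lr.2.foldl (pvDStep lr.1) d) d).getD (k, l) 0
      = d.getD (k, l) 0 + (L.map (fun lr => if lr.1 = l then (lr.2.map (pvContrib k)).sum else 0)).sum := by
  induction L generalizing d with
  | nil => simp
  | cons lr L ih =>
    simp only [List.foldl_cons, List.map_cons, List.sum_cons, ih, pvDFold_getD]
    ring

lemma pvSum_pick {c : Int → Int} (l : Int) (js : List Int) (hnd : js.Nodup) (hl : l ∈ js) :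
    (js.map (fun j => if j = l then c j else 0)).sum = c l := by
  induction js with
  | nil => simp at hl
  | cons j js ih =>
    simp only [List.map_cons, List.sum_cons]
    rcases List.mem_cons.mp hl with h | h
    · subst h
      have hz : ∀ y ∈ js.map (fun x => if x = l then c x else 0), y = 0 := by
        intro y hy
        obtain ⟨x, hx, rfl⟩ := List.mem_map.mp hy
        have hne : x ≠ l := by rintro rfl; exact (List.nodup_cons.mp hnd).1 hx
        simp [hne]
      rw [if_pos rfl, List.sum_eq_zero hz, add_zero]
    · have hj : j ≠ l := by rintro rfl; exact (List.nodup_cons.mp hnd).1 h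
      rw [if_neg hj, ih (List.nodup_cons.mp hnd).2 h, zero_add]

lemma pvRange_nodup (n : Nat) : (PySem.List.pyRange 0 (n : Int)).Nodup := by
  rw [PySem.List.pyRange_zero_natCast]
  exact (List.nodup_range).map (fun a b => by exact_mod_cast id)

lemma pvDeltas_spec (stop : Int) (anns : List (List (Int × Int))) (k l : Int)
    (h0 : 0 ≤ l) (hn : l < (anns.length : Int)) :
    (pvBuildB stop anns).2.getD (k, l) 0 = ((PySem.List.pyGetD anns l []).map (pvContrib k)).sum := by
  rw [pvBuildB_eq]
  show (List.foldl (fun d lr => lr.2.foldl (pvDStep lr.1) d) PySem.Dict.empty (PySem.List.enumerate anns 0)).getD (k, l) 0 = _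
  rw [pvDeltasFold_getD]
  rw [PySem.List.enumerate_eq_map_pyRange anns []]
  rw [List.map_map]
  have hlen : PySem.List.len anns = (anns.length : Int) := by simp [PySem.List.len]
  rw [hlen]
  have hmem : l ∈ PySem.List.pyRange 0 (anns.length : Int) := PySem.List.mem_pyRange_one.mpr ⟨h0, hn⟩
  have := pvSum_pick (c := fun j => ((PySem.List.pyGetD anns j []).map (pvContrib k)).sum) l
      (PySem.List.pyRange 0 (anns.length : Int)) (pvRange_nodup anns.length) hmem
  rw [show ((fun (lr : Int × List (Int × Int)) => if lr.1 = l then (List.map (pvContrib k) lr.2).sum else 0) ∘ fun j =>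
            (j, PySem.List.pyGetD anns j [])) = (fun j => if j = l then (List.map (pvContrib k) (PySem.List.pyGetD anns j [])).sum else 0) from rfl]
  rw [this]
  simp

lemma pvInd_append (p x : Int) (proc : List Int) (hp : p ∉ proc) :
    (if x ∈ proc ++ [p] then (1:Int) else 0) = (if x ∈ proc then (1:Int) else 0) + (if x = p then 1 else 0) := by
  by_cases h1 : x ∈ proc
  · have hne : x ≠ p := fun e => hp (e ▸ h1)
    simp [h1, hne, List.mem_append]
  · by_cases h2 : x = p <;> simp [h1, h2, List.mem_append, hp]

lemma pvS_nil (anns : List (List (Int × Int))) (l : Int) : pvS anns [] l = 0 := by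
  unfold pvS
  rw [List.sum_eq_zero]
  intro y hy
  obtain ⟨r, _, rfl⟩ := List.mem_map.mp hy
  simp

lemma pvS_step (anns : List (List (Int × Int))) (proc : List Int) (p l : Int) (hp : p ∉ proc) :
    pvS anns (proc ++ [p]) l = pvS anns proc l + ((PySem.List.pyGetD anns l []).map (pvContrib p)).sum := by
  unfold pvS
  rw [← List.sum_map_add]
  apply congrArg
  apply List.map_congr_left
  intro r _
  unfold pvContrib
  by_cases hxy : r.1 < r.2
  · simp only [hxy, if_true, pvInd_append p r.1 proc hp, pvInd_append p r.2 proc hp]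
    ring
  · simp [hxy]

lemma pvCounts_init (anns : List (List (Int × Int))) :
    (PySem.List.pyRange 0 (anns.length : Int)).map (pvS anns []) = List.replicate anns.length 0 := by
  rw [List.map_congr_left (g := fun _ => (0:Int)) (by intro a _; exact pvS_nil anns a)]
  rw [List.map_const']
  congr 1
  rw [PySem.List.pyRange_zero_natCast, List.length_map, List.length_range]

lemma pvCounts_step (stop : Int) (anns : List (List (Int × Int))) (p : Int) (proc : List Int)
    (hp : p ∉ proc) :
    (PySem.List.enumerate ((PySem.List.pyRange 0 (anns.length : Int)).map (pvS anns proc)) 0).map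
        (fun lc => lc.2 + (pvBuildB stop anns).2.getD (p, lc.1) 0)
      = (PySem.List.pyRange 0 (anns.length : Int)).map (pvS anns (proc ++ [p])) := by
  rw [PySem.List.enumerate_eq_map_pyRange _ 0]
  have hlen : PySem.List.len ((PySem.List.pyRange 0 (anns.length : Int)).map (pvS anns proc))
      = (anns.length : Int) := by
    simp [PySem.List.len, PySem.List.pyRange_zero_natCast]
  rw [hlen, List.map_map]
  apply List.map_congr_left
  intro j hj
  obtain ⟨h0, hn⟩ := PySem.List.mem_pyRange_one.mp hj
  have hk : j = ((j.toNat : Nat) : Int) := by omega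
  have hklt : j.toNat < anns.length := by omega
  have hget : PySem.List.pyGetD ((PySem.List.pyRange 0 (anns.length : Int)).map (pvS anns proc)) j 0
      = pvS anns proc j := by
    rw [hk, PySem.List.pyGetD_map_pyRange _ _ _ _ hklt]
  simp only [Function.comp_apply]
  rw [hget, pvS_step anns proc p j hp, pvDeltas_spec stop anns p j h0 hn]

lemma pvFilterMap_filter (c : Int → Bool) (js : List Int) :
    js.filterMap (fun j => if c j then some j else none) = js.filter c := by
  induction js with
  | nil => rfl
  | cons j js ih =>
    by_cases h : c j <;> simp [h, ih]

lemma pvS_pos_iff (anns : List (List (Int × Int))) (p : Int) (proc' : List Int) (l : Int)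
    (ha : ∀ q ∈ proc', q ≤ p) (hb : ∀ c ∈ pvAllCoords anns, c ≤ p → c ∈ proc')
    (h0 : 0 ≤ l) (hn : l < (anns.length : Int)) :
    ((PySem.List.pyGetD anns l []).any (fun r => decide (r.1 ≤ p) && decide (p < r.2)))
      = decide (0 < pvS anns proc' l) := by
  have hregs : ∀ r ∈ PySem.List.pyGetD anns l [], r.1 ∈ pvAllCoords anns ∧ r.2 ∈ pvAllCoords anns := by
    intro r hr
    have hmem : PySem.List.pyGetD anns l [] ∈ anns := by
      have hk : l = ((l.toNat : Nat) : Int) := by omega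
      have hklt : l.toNat < anns.length := by omega
      rw [hk, PySem.List.pyGetD_natCast]
      rw [List.getD_eq_getElem _ _ hklt]
      exact List.getElem_mem hklt
    have hr' : r ∈ anns.flatten := List.mem_flatten.mpr ⟨_, hmem, hr⟩
    constructor <;> [exact List.mem_flatMap.mpr ⟨r, hr', by simp⟩;
      exact List.mem_flatMap.mpr ⟨r, hr', by simp⟩]
  have hiff : ∀ x, x ∈ pvAllCoords anns → ((x ∈ proc') ↔ x ≤ p) := by
    intro x hx
    exact ⟨fun h => ha x h, fun h => hb x hx h⟩
  have hsum : pvS anns proc' l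
      = (((PySem.List.pyGetD anns l []).countP (fun r => decide (r.1 ≤ p) && decide (p < r.2)) : Nat) : Int) := by
    unfold pvS
    rw [← PySem.List.sum_map_ite_one_zero]
    apply congrArg
    apply List.map_congr_left
    intro r hr
    obtain ⟨hx, hy⟩ := hregs r hr
    have hxiff := hiff r.1 hx
    have hyiff := hiff r.2 hy
    by_cases hxy : r.1 < r.2
    · by_cases hxp : r.1 ≤ p
      · by_cases hyp : r.2 ≤ p
        · have h1 : r.1 ∈ proc' := hxiff.mpr hxp
          have h2 : r.2 ∈ proc' := hyiff.mpr hyp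
          have : ¬ p < r.2 := by omega
          simp [hxy, h1, h2, hxp, this]
        · have h1 : r.1 ∈ proc' := hxiff.mpr hxp
          have h2 : r.2 ∉ proc' := fun h => hyp (hyiff.mp h)
          have : p < r.2 := by omega
          simp [hxy, h1, h2, hxp, this]
      · have h1 : r.1 ∉ proc' := fun h => hxp (hxiff.mp h)
        have h2 : r.2 ∉ proc' := fun h => by have := hyiff.mp h; omega
        simp [hxy, h1, h2, hxp]
    · have : ¬ (r.1 ≤ p ∧ p < r.2) := by omega
      by_cases hxp : r.1 ≤ p <;> simp [hxy, hxp] <;> omega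
  rw [hsum]
  by_cases hany : (PySem.List.pyGetD anns l []).any (fun r => decide (r.1 ≤ p) && decide (p < r.2)) = true
  · have hpos := List.countP_pos_iff.mpr (List.any_eq_true.mp hany)
    rw [hany]
    symm
    rw [decide_eq_true_iff]
    exact_mod_cast hpos
  · have h0c : (PySem.List.pyGetD anns l []).countP (fun r => decide (r.1 ≤ p) && decide (p < r.2)) = 0 := by
      rw [List.countP_eq_zero]
      intro a hma hpa
      exact hany (List.any_eq_true.mpr ⟨a, hma, hpa⟩)
    rw [h0c]
    rw [Bool.eq_false_iff.mpr hany]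
    norm_num

lemma pvLevels_eq (anns : List (List (Int × Int))) (p : Int) (proc' : List Int)
    (ha : ∀ q ∈ proc', q ≤ p) (hb : ∀ c ∈ pvAllCoords anns, c ≤ p → c ∈ proc') :
    pvLevelsAt anns p = PySem.Set.ofList ((PySem.List.pyRange 0 (anns.length : Int)).filter
      (fun l => decide (0 < PySem.List.pyGetD ((PySem.List.pyRange 0 (anns.length : Int)).map (pvS anns proc')) l 0))) := by
  unfold pvLevelsAt
  apply congrArg
  rw [PySem.List.enumerate_eq_map_pyRange anns [], List.filterMap_map]
  have hlen : PySem.List.len anns = (anns.length : Int) := by simp [PySem.List.len]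
  rw [hlen]
  rw [show ((fun (lr : Int × List (Int × Int)) => if lr.2.any (fun r => decide (r.1 ≤ p) && decide (p < r.2)) then some lr.1 else none) ∘ fun j => (j, PySem.List.pyGetD anns j []))
      = (fun j => if (PySem.List.pyGetD anns j []).any (fun r => decide (r.1 ≤ p) && decide (p < r.2)) then some j else none) from rfl]
  rw [pvFilterMap_filter]
  apply List.filter_congr
  intro j hj
  obtain ⟨h0, hn⟩ := PySem.List.mem_pyRange_one.mp hj
  have hk : j = ((j.toNat : Nat) : Int) := by omega
  have hklt : j.toNat < anns.length := by omega
  have hget : PySem.List.pyGetD ((PySem.List.pyRange 0 (anns.length : Int)).map (pvS anns proc')) j 0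
      = pvS anns proc' j := by
    rw [hk, PySem.List.pyGetD_map_pyRange _ _ _ _ hklt]
  rw [hget]
  exact pvS_pos_iff anns p proc' j ha hb h0 hn

lemma pvLoop_eq (stop : Int) (anns : List (List (Int × Int))) :
    ∀ (rest proc : List Int) (pl : List Int) (part_start : Int) (acc : List (Int × Int × List Int)),
    (proc ++ rest).Pairwise (· < ·) →
    (∀ c ∈ pvAllCoords anns, c ∈ proc ++ rest) →
    stop ∈ rest →
    (∀ q ∈ rest, 0 < q) →
    pvLoopA stop anns rest part_start (some pl) acc
      = pvLoopB stop anns.length (pvBuildB stop anns).2 rest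
          ((PySem.List.pyRange 0 (anns.length : Int)).map (pvS anns proc)) part_start (some pl) acc := by
  intro rest
  induction rest with
  | nil => intro proc pl part_start acc _ _ hstop _; simp at hstop
  | cons p rest ih =>
    intro proc pl part_start acc hpw hmem hstop hpos
    have hsplit := List.pairwise_append.mp hpw
    have hcons : (p :: rest).Pairwise (· < ·) := hsplit.2.1
    have hproclt : ∀ q ∈ proc, q < p := fun q hq => hsplit.2.2 q hq p (List.mem_cons_self)
    have hpnotproc : p ∉ proc := fun h => lt_irrefl p (hproclt p h)
    by_cases hps : p = stop
    · subst hps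
      simp [pvLoopA, pvLoopB]
    · have hp0 : 0 < p := hpos p List.mem_cons_self
      have hpne0 : p ≠ 0 := by omega
      have hstop' : stop ∈ rest := by
        rcases List.mem_cons.mp hstop with h | h
        · exact absurd h.symm hps
        · exact h
      have hcounts := pvCounts_step stop anns p proc hpnotproc
      have ha : ∀ q ∈ proc ++ [p], q ≤ p := by
        intro q hq
        rcases List.mem_append.mp hq with h | h
        · exact le_of_lt (hproclt q h)
        · simp at h; omega
      have hb : ∀ c ∈ pvAllCoords anns, c ≤ p → c ∈ proc ++ [p] := by
        intro c hc hcp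
        rcases List.mem_append.mp (hmem c hc) with h | h
        · exact List.mem_append.mpr (Or.inl h)
        · rcases List.mem_cons.mp h with h | h
          · exact List.mem_append.mpr (Or.inr (by simp [h]))
          · have : p < c := (List.pairwise_cons.mp hcons).1 c h
            omega
      have hlv := pvLevels_eq anns p (proc ++ [p]) ha hb
      -- unfold one step of both loops
      show (if p = stop then acc ++ [(part_start, p, (some pl).getD [])]
        else
          let levels := pvLevelsAt anns p
          if p = 0 then pvLoopA stop anns rest part_start (some levels) acc
          else if some levels ≠ some pl then
            pvLoopA stop anns rest p (some levels) (acc ++ [(part_start, p, (some pl).getD [])])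
          else pvLoopA stop anns rest part_start (some pl) acc) = _
      rw [if_neg hps]
      show _ = (if p = stop then acc ++ [(part_start, p, (some pl).getD [])]
        else
          let counts := (PySem.List.enumerate ((PySem.List.pyRange 0 (anns.length : Int)).map (pvS anns proc)) 0).map
            (fun lc => lc.2 + (pvBuildB stop anns).2.getD (p, lc.1) 0)
          let levels := PySem.Set.ofList ((PySem.List.pyRange 0 ((anns.length : Nat) : Int)).filter
            (fun l => decide (0 < PySem.List.pyGetD counts l 0)))
          if p = 0 then pvLoopB stop anns.length (pvBuildB stop anns).2 rest counts part_start (some levels) acc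
          else if some levels ≠ some pl then
            pvLoopB stop anns.length (pvBuildB stop anns).2 rest counts p (some levels) (acc ++ [(part_start, p, (some pl).getD [])])
          else pvLoopB stop anns.length (pvBuildB stop anns).2 rest counts part_start (some pl) acc)
      rw [if_neg hps]
      simp only [hcounts]
      rw [← hlv]
      have hrec : ∀ ps' pl' acc', pvLoopA stop anns rest ps' (some pl') acc'
          = pvLoopB stop anns.length (pvBuildB stop anns).2 rest
            ((PySem.List.pyRange 0 (anns.length : Int)).map (pvS anns (proc ++ [p]))) ps' (some pl') acc' := by
        intro ps' pl' acc'
        apply ih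
        · rw [← List.append_cons]; exact hpw
        · intro c hc; rw [← List.append_cons]; exact hmem c hc
        · exact hstop'
        · exact fun q hq => hpos q (List.mem_cons_of_mem p hq)
      rw [if_neg hpne0, if_neg hpne0]
      by_cases hlvl : pvLevelsAt anns p = pl
      · rw [if_neg (by simp [hlvl]), if_neg (by simp [hlvl])]
        exact hrec part_start pl acc
      · rw [if_pos (by simp [hlvl]), if_pos (by simp [hlvl])]
        exact hrec p (pvLevelsAt anns p) (acc ++ [(part_start, p, pl)])

lemma pvMain_eq : ∀ (stop : Int) (annotations : Option (List (List (Int × Int)))),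
    (1 ≤ stop ∧ ∀ lv ∈ annotations.getD [], ∀ r ∈ lv, 0 ≤ r.1 ∧ 0 ≤ r.2) →
    partition_range stop annotations = partition_range_alt stop annotations := by
  intro stop annotations hpre
  obtain ⟨hstop1, hcoord⟩ := hpre
  set anns := annotations.getD [] with hanns
  have hcoords : ∀ c ∈ pvAllCoords anns, 0 ≤ c := by
    intro c hc
    obtain ⟨r, hr, hcr⟩ := List.mem_flatMap.mp hc
    obtain ⟨lv, hlv, hrlv⟩ := List.mem_flatten.mp hr
    have := hcoord lv hlv r hrlv
    have hcr' : c = r.1 ∨ c = r.2 := by simpa using hcr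
    rcases hcr' with h | h <;> omega
  show pvLoopA stop anns (PySem.List.sorted (PySem.Set.ofList (0 :: stop :: pvAllCoords anns)) (fun x => x) false) 0 none []
    = pvLoopB stop anns.length (pvBuildB stop anns).2
        (PySem.List.sorted (pvBuildB stop anns).1 (fun x => x) false) (List.replicate anns.length 0) 0 none []
  rw [pvBuildB_fst]
  set L := PySem.List.sorted (PySem.Set.ofList (0 :: stop :: pvAllCoords anns)) (fun x => x) false with hL
  have hpw : L.Pairwise (· < ·) := PySem.List.sorted_ofList_pairwise_lt _
  have hmemL : ∀ x : Int, x ∈ L ↔ x ∈ 0 :: stop :: pvAllCoords anns := by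
    intro x
    rw [hL, (PySem.List.sorted_perm _ _ _).mem_iff, PySem.Set.mem_ofList]
  have h0L : (0:Int) ∈ L := (hmemL 0).mpr (by simp)
  have hstopL : stop ∈ L := (hmemL stop).mpr (by simp)
  have hnonneg : ∀ x ∈ L, 0 ≤ x := by
    intro x hx
    have hx' : x = 0 ∨ x = stop ∨ x ∈ pvAllCoords anns := by simpa using (hmemL x).mp hx
    rcases hx' with h | h | h
    · omega
    · omega
    · exact hcoords x h
  obtain ⟨h, t, hLt⟩ : ∃ h t, L = h :: t := by
    cases hLcase : L with
    | nil => rw [hLcase] at h0L; simp at h0L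
    | cons a b => exact ⟨a, b, rfl⟩
  have hh0 : h = 0 := by
    rw [hLt] at h0L hpw hnonneg
    rcases List.mem_cons.mp h0L with hc | hc
    · omega
    · have := (List.pairwise_cons.mp hpw).1 0 hc
      have := hnonneg h (List.mem_cons_self)
      omega
  subst hh0
  rw [hLt]
  have hpwt := hpw
  rw [hLt] at hpwt
  have htpos : ∀ q ∈ t, 0 < q := fun q hq => (List.pairwise_cons.mp hpwt).1 q hq
  have hstopt : stop ∈ t := by
    rw [hLt] at hstopL
    rcases List.mem_cons.mp hstopL with hc | hc
    · omega
    · exact hc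
  have hstopne : (0:Int) ≠ stop := by omega
  -- first iteration on both sides
  have ha0 : ∀ q ∈ ([] : List Int) ++ [0], q ≤ (0:Int) := by intro q hq; simp at hq; omega
  have hb0 : ∀ c ∈ pvAllCoords anns, c ≤ 0 → c ∈ ([] : List Int) ++ [0] := by
    intro c hc hcle
    have := hcoords c hc
    simp
    omega
  have hlv0 := pvLevels_eq anns 0 ([] ++ [0]) ha0 hb0
  have hcounts0 := pvCounts_step stop anns 0 [] (by simp)
  show (if (0:Int) = stop then [] ++ [(0, 0, (none : Option (List Int)).getD [])]
    else
      let levels := pvLevelsAt anns 0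
      if (0:Int) = 0 then pvLoopA stop anns t 0 (some levels) []
      else if some levels ≠ none then
        pvLoopA stop anns t 0 (some levels) ([] ++ [(0, 0, (none : Option (List Int)).getD [])])
      else pvLoopA stop anns t 0 none []) = _
  rw [if_neg hstopne, if_pos rfl]
  show _ = (if (0:Int) = stop then [] ++ [((0:Int), (0:Int), (none : Option (List Int)).getD [])]
    else
      let counts := (PySem.List.enumerate (List.replicate anns.length (0:Int)) 0).map
        (fun lc => lc.2 + (pvBuildB stop anns).2.getD (0, lc.1) 0)
      let levels := PySem.Set.ofList ((PySem.List.pyRange 0 ((anns.length : Nat) : Int)).filter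
        (fun l => decide (0 < PySem.List.pyGetD counts l 0)))
      if (0:Int) = 0 then pvLoopB stop anns.length (pvBuildB stop anns).2 t counts 0 (some levels) []
      else if some levels ≠ none then
        pvLoopB stop anns.length (pvBuildB stop anns).2 t counts 0 (some levels) ([] ++ [((0:Int), (0:Int), (none : Option (List Int)).getD [])])
      else pvLoopB stop anns.length (pvBuildB stop anns).2 t counts 0 none [])
  rw [if_neg hstopne, if_pos rfl]
  rw [← pvCounts_init anns]
  simp only [hcounts0]
  rw [← hlv0]
  apply pvLoop_eq stop anns t ([] ++ [0]) (pvLevelsAt anns 0) 0 []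
  · simpa using hpwt
  · intro c hc
    have := (hmemL c).mpr (by simp [hc])
    rw [hLt] at this
    simpa using this
  · exact hstopt
  · exact htpos

-- ===== VERDICT (by name: the statement is the Claim_ definition above) =====
theorem partition_range_spec : Claim_equal_partition_range := by
  intro stop annotations _ hpre
  unfold Pre_partition_range at hpre
  unfold Spec_partition_range
  exact pvMain_eq stop annotations hpre
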